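-- pv_equiv track=rewrite | github.com/ZhaiHaoqing/MQAEE | ArgExtmodel.py | get_role_seqlabels
-- ===== SOURCE A (Python) =====
-- def get_role_seqlabels(roles, token_num, specify_role=None):
--     labels = ['O'] * token_num
--     count = 0
--     for role in roles:
--         start, end = role[0], role[1]
--         if end > token_num:
--             continue
--         role_type = role[2]
--
--         if specify_role is not None:
--             if role_type != specify_role:
--                 continue
--
--         if any([labels[i] != 'O' for i in range(start, end)]):
--             count += 1
--             continue
--
--         labels[start] = 'B-{}'.format("Span")
--         for i in range(start + 1, end):
--             labels[i] = 'I-{}'.format("Span")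
--
--     return labels
-- ===== SOURCE B (Python) =====
-- def get_role_seqlabels(roles, token_num, specify_role=None):
--     # Collect the accepted spans first (first-wins, interval overlap test),
--     # then render the label list in one pass.
--     spans = []
--     for role in roles:
--         start, end = role[0], role[1]
--         if end > token_num:
--             continue
--         if specify_role is not None and role[2] != specify_role:
--             continue
--         if not 0 <= start < end:
--             raise ValueError("role span must satisfy 0 <= start < end")
--         if all(end <= s or e <= start for s, e in spans):
--             spans.append((start, end))
--     return ['B-Span' if any(s == i for s, e in spans)
--             else 'I-Span' if any(s < i < e for s, e in spans)
--             else 'O'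
--             for i in range(token_num)]
-- ===== Notes on version B (the rewrite author's own statement) =====
-- stated objective: alternative
-- what changed: B first collects the accepted spans with an interval-overlap test against the accepted list (instead of A's per-cell rescan of the mutated label array for every role) and then renders the label list in one final pass; Pre_ additionally excludes roles that pass the filters with a negative start or an empty span (start >= end), where A's labels are artefacts of Python negative-index wraparound and B raises ValueError.
-- outside the precondition, e.g. on get_role_seqlabels([(1, 1, 'ARG0')], 3, None): A returns ['O', 'B-Span', 'O'], B raises ValueError; on get_role_seqlabels([(-1, 2, 'ARG0')], 4, None): A returns ['I-Span', 'I-Span', 'O', 'B-Span'], B raises ValueError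
import Mathlib
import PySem

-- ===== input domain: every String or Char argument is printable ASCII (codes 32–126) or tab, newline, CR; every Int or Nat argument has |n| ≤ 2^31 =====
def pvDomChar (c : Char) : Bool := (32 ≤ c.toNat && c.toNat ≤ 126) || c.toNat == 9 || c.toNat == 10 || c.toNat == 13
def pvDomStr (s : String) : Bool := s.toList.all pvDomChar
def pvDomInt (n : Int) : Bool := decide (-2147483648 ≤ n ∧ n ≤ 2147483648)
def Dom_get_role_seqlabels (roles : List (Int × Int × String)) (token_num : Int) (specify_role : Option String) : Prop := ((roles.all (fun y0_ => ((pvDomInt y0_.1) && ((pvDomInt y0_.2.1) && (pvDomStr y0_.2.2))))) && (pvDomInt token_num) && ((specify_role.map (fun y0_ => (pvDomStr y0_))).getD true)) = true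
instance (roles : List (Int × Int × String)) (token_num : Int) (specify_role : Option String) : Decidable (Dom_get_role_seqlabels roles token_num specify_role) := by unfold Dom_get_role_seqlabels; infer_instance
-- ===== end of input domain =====

-- B collects the accepted spans with an interval-overlap test and renders the label list in
-- one final pass, instead of A's in-place writes with a per-cell rescan of the labels; B
-- raises ValueError on spans outside 0 <= start < end (outside Pre_, where A's values are
-- negative-indexing artefacts).

-- ===== PORT A =====
def get_role_seqlabels (roles : List (Int × Int × String)) (token_num : Int) (specify_role : Option String) : List String :=
  -- labels = ['O'] * token_num  (empty when token_num ≤ 0, exactly as in Python)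
  let init : List String × Int := (List.replicate token_num.toNat "O", 0)
  let res := roles.foldl (fun st role =>
    let start := role.1
    let stop := role.2.1
    if stop > token_num then st
    else if (match specify_role with | some sp => role.2.2 != sp | none => false) then st
    -- any([labels[i] != 'O' for i in range(start, end)])
    else if (PySem.List.pyRange start stop 1).any (fun i => PySem.List.pyGetD st.1 i "O" != "O") then
      (st.1, st.2 + 1)
    else
      -- labels[start] = 'B-{}'.format("Span")
      let labels := PySem.List.pySetD st.1 start "B-Span"
      -- for i in range(start + 1, end): labels[i] = 'I-{}'.format("Span")
      let labels := (PySem.List.pyRange (start + 1) stop 1).foldl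
        (fun l i => PySem.List.pySetD l i "I-Span") labels
      (labels, st.2)) init
  res.1

-- ===== PORT B =====
def get_role_seqlabels_alt (roles : List (Int × Int × String)) (token_num : Int) (specify_role : Option String) : List String :=
  -- state none = ValueError was raised
  let spans? := roles.foldl (fun (st : Option (List (Int × Int))) role =>
    match st with
    | none => none
    | some spans =>
      let start := role.1
      let stop := role.2.1
      if stop > token_num then some spans
      else if (match specify_role with | some sp => role.2.2 != sp | none => false) then some spans
      else if decide (0 ≤ start ∧ start < stop) then
        (if spans.all (fun se => decide (stop ≤ se.1) || decide (se.2 ≤ start)) then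
          some (spans ++ [(start, stop)])
        else some spans)
      else none) (some [])
  match spans? with
  | none => []  -- raise ValueError: unreachable under Pre_, where the Python raises
  | some spans =>
    (PySem.List.pyRange 0 token_num 1).map (fun i =>
      if spans.any (fun se => se.1 == i) then "B-Span"
      else if spans.any (fun se => decide (se.1 < i) && decide (i < se.2)) then "I-Span"
      else "O")

-- ===== PRECONDITION & SPEC =====
-- Pre_ excludes (a) the inputs where the Python A raises IndexError (a role passing the two
-- filters whose start falls outside Python's negative-index range), and (b) roles passing the
-- filters with a negative start or an empty span (start >= end): there A's labels are
-- artefacts of Python negative-index wraparound (wrapped 'I-Span' cells, a lone 'B-Span'),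
-- and B's natural algorithm raises ValueError.
def Pre_get_role_seqlabels (roles : List (Int × Int × String)) (token_num : Int) (specify_role : Option String) : Prop :=
  ∀ r ∈ roles,
    (r.2.1 ≤ token_num ∧ (specify_role = none ∨ specify_role = some r.2.2)) →
    (0 ≤ r.1 ∧ r.1 < r.2.1)
instance (roles : List (Int × Int × String)) (token_num : Int) (specify_role : Option String) : Decidable (Pre_get_role_seqlabels roles token_num specify_role) := by unfold Pre_get_role_seqlabels; infer_instance

def pvWitness_get_role_seqlabels : (List (Int × Int × String)) × Int × Option String :=
  ([(0, 2, "ARG0"), (1, 3, "ARG1")], 4, none)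

def Spec_get_role_seqlabels (roles : List (Int × Int × String)) (token_num : Int) (specify_role : Option String) (out : List String) : Prop := out = get_role_seqlabels_alt roles token_num specify_role
instance (roles : List (Int × Int × String)) (token_num : Int) (specify_role : Option String) (out : List String) : Decidable (Spec_get_role_seqlabels roles token_num specify_role out) := by unfold Spec_get_role_seqlabels; infer_instance

-- ===== CLAIM (what is proved, stated in full; the proofs are below) =====
def Claim_equal_get_role_seqlabels : Prop := ∀ (roles : List (Int × Int × String)) (token_num : Int) (specify_role : Option String), Dom_get_role_seqlabels roles token_num specify_role → Pre_get_role_seqlabels roles token_num specify_role → Spec_get_role_seqlabels roles token_num specify_role (get_role_seqlabels roles token_num specify_role)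

-- ===== LEMMAS AND PROOFS =====
def gP (l : List String) (j : Int) : String := l.getD j.toNat "!"
def posN (n : Nat) (i : Int) : Int := if i < 0 then i + n else i

lemma pyGetD_norm (l : List String) (i : Int) (d : String)
    (h1 : -(l.length : Int) ≤ i) (h2 : i < (l.length : Int)) :
    PySem.List.pyGetD l i d = gP l (posN l.length i) := by
  unfold gP posN
  simp only [PySem.List.pyGetD, PySem.List.pyGet?, PySem.List.pyIdx?]
  by_cases h : 0 ≤ i
  · rw [if_pos h, if_pos h2, if_neg (by omega)]
    have hlt : i.toNat < l.length := by omega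
    simp [List.getD_eq_getElem?_getD, List.getElem?_eq_getElem hlt]
  · rw [if_neg h, if_pos h1, if_pos (by omega)]
    have : (i + (l.length : Int)).toNat = l.length - (-i).toNat := by omega
    have hlt : l.length - (-i).toNat < l.length := by omega
    simp [List.getD_eq_getElem?_getD, this, List.getElem?_eq_getElem hlt]

lemma pySetD_norm (l : List String) (i : Int) (v : String)
    (h1 : -(l.length : Int) ≤ i) (h2 : i < (l.length : Int)) :
    PySem.List.pySetD l i v = l.set (posN l.length i).toNat v := by
  unfold posN
  simp only [PySem.List.pySetD, PySem.List.pySet?, PySem.List.pyIdx?]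
  by_cases h : 0 ≤ i
  · rw [if_pos h, if_pos h2, if_neg (by omega)]
    simp
  · rw [if_neg h, if_pos h1, if_pos (by omega)]
    have : (i + (l.length : Int)).toNat = l.length - (-i).toNat := by omega
    simp [this]

lemma gP_pyGetD (l : List String) (i : Int) (d : String)
    (h0 : 0 ≤ i) (h1 : i < (l.length : Int)) :
    PySem.List.pyGetD l i d = gP l i := by
  rw [pyGetD_norm l i d (by omega) h1]
  unfold posN
  rw [if_neg (by omega)]

lemma set_pySetD (l : List String) (i : Int) (v : String)
    (h0 : 0 ≤ i) (h1 : i < (l.length : Int)) :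
    PySem.List.pySetD l i v = l.set i.toNat v := by
  rw [pySetD_norm l i v (by omega) h1]
  unfold posN
  rw [if_neg (by omega)]

lemma gP_set (l : List String) (j k : Int)
    (hj0 : 0 ≤ j) (hj : j < (l.length : Int)) (hk0 : 0 ≤ k) (hk : k < (l.length : Int)) (v : String) :
    gP (l.set k.toNat v) j = if j = k then v else gP l j := by
  unfold gP
  rw [List.getD_eq_getElem?_getD, List.getD_eq_getElem?_getD, List.getElem?_set]
  by_cases h : j = k
  · subst h; rw [if_pos (by omega : j.toNat < l.length), if_pos rfl]; simp
  · rw [if_neg (by omega), if_neg h]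

def covB (spans : List (Int × Int)) (j : Int) : Bool := spans.any (fun se => se.1 == j)
def covI (spans : List (Int × Int)) (j : Int) : Bool :=
  spans.any (fun se => decide (se.1 < j) && decide (j < se.2))
def covC (spans : List (Int × Int)) (j : Int) : Bool :=
  spans.any (fun se => decide (se.1 <= j) && decide (j < se.2))

def render (spans : List (Int × Int)) (j : Int) : String :=
  if covB spans j then "B-Span" else if covI spans j then "I-Span" else "O"

def LoopInv (n : Nat) (labels : List String) (spans : List (Int × Int)) : Prop :=
  labels.length = n ∧
  (∀ se ∈ spans, 0 ≤ se.1 ∧ se.1 < se.2 ∧ se.2 ≤ (n : Int)) ∧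
  (∀ j : Int, 0 ≤ j → j < (n : Int) → gP labels j = render spans j)

lemma writeI_fold (n k : Nat) : ∀ (a b : Int) (l : List String), l.length = n →
    0 ≤ a → b ≤ (n : Int) → (b - a).toNat = k →
    ((PySem.List.pyRange a b 1).foldl (fun l i => PySem.List.pySetD l i "I-Span") l).length = n ∧
    (∀ j : Int, 0 ≤ j → j < (n : Int) →
      gP ((PySem.List.pyRange a b 1).foldl (fun l i => PySem.List.pySetD l i "I-Span") l) j
        = if a ≤ j ∧ j < b then "I-Span" else gP l j) := by
  induction k with
  | zero =>
    intro a b l hl ha hb hk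
    rw [PySem.List.pyRange_one_eq_nil (by omega)]
    refine ⟨hl, fun j hj0 hjn => ?_⟩
    rw [List.foldl_nil, if_neg (by omega)]
  | succ k ih =>
    intro a b l hl ha hb hk
    rw [PySem.List.pyRange_one_cons (by omega), List.foldl_cons]
    have hset : PySem.List.pySetD l a "I-Span" = l.set a.toNat "I-Span" :=
      set_pySetD l a "I-Span" ha (by omega)
    have hlen : (l.set a.toNat "I-Span").length = n := by simp [hl]
    obtain ⟨ihl, ihp⟩ := ih (a + 1) b (l.set a.toNat "I-Span") hlen (by omega) hb (by omega)
    refine ⟨by rw [hset]; exact ihl, fun j hj0 hjn => ?_⟩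
    rw [hset, ihp j hj0 hjn]
    rw [gP_set l j a hj0 (by omega) ha (by omega)]
    by_cases h1 : a + 1 ≤ j ∧ j < b
    · rw [if_pos h1, if_pos (by omega)]
    · rw [if_neg h1]
      by_cases h2 : j = a
      · rw [if_pos h2, if_pos (by omega)]
      · rw [if_neg h2, if_neg (by omega)]

lemma covB_append (xs ys : List (Int × Int)) (j : Int) :
    covB (xs ++ ys) j = (covB xs j || covB ys j) := by simp [covB]
lemma covI_append (xs ys : List (Int × Int)) (j : Int) :
    covI (xs ++ ys) j = (covI xs j || covI ys j) := by simp [covI]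

lemma covB_true (spans : List (Int × Int)) (j : Int) :
    covB spans j = true ↔ ∃ se ∈ spans, se.1 = j := by simp [covB]
lemma covI_true (spans : List (Int × Int)) (j : Int) :
    covI spans j = true ↔ ∃ se ∈ spans, se.1 < j ∧ j < se.2 := by simp [covI]
lemma covC_true (spans : List (Int × Int)) (j : Int) :
    covC spans j = true ↔ ∃ se ∈ spans, se.1 ≤ j ∧ j < se.2 := by simp [covC]

lemma render_ne_O (spans : List (Int × Int)) (j : Int)
    (hsp : ∀ se ∈ spans, se.1 < se.2) :
    (render spans j ≠ "O") ↔ covC spans j = true := by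
  unfold render
  constructor
  · intro h
    by_cases hB : covB spans j = true
    · obtain ⟨se, hm, hj⟩ := (covB_true spans j).mp hB
      exact (covC_true spans j).mpr ⟨se, hm, by have := hsp se hm; omega⟩
    · rw [if_neg hB] at h
      by_cases hI : covI spans j = true
      · obtain ⟨se, hm, h1, h2⟩ := (covI_true spans j).mp hI
        exact (covC_true spans j).mpr ⟨se, hm, by omega⟩
      · rw [if_neg hI] at h; exact absurd rfl h
  · intro h
    obtain ⟨se, hm, h1, h2⟩ := (covC_true spans j).mp h
    by_cases hB : covB spans j = true
    · rw [if_pos hB]; decide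
    · rw [if_neg hB]
      have hlt : se.1 < j := by
        rcases lt_or_eq_of_le h1 with h | h
        · exact h
        · exact absurd ((covB_true spans j).mpr ⟨se, hm, h⟩) hB
      rw [if_pos ((covI_true spans j).mpr ⟨se, hm, hlt, h2⟩)]
      decide

-- A's occupancy scan over [s,e) equals (the negation of) B's interval-disjointness test.
lemma scan_eq (n : Nat) (labels : List String) (spans : List (Int × Int))
    (hInv : LoopInv n labels spans) (s e : Int) (hs : 0 ≤ s) (hse : s < e) (he : e ≤ (n : Int)) :
    ((PySem.List.pyRange s e 1).any (fun i => PySem.List.pyGetD labels i "O" != "O"))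
      = !(spans.all (fun se => decide (e ≤ se.1) || decide (se.2 ≤ s))) := by
  obtain ⟨hlen, hsp, hpt⟩ := hInv
  have hsp' : ∀ se ∈ spans, se.1 < se.2 := fun se h => (hsp se h).2.1
  have key : ((PySem.List.pyRange s e 1).any (fun i => PySem.List.pyGetD labels i "O" != "O")) = true ↔
      ∃ se ∈ spans, ¬(e ≤ se.1 ∨ se.2 ≤ s) := by
    rw [List.any_eq_true]
    constructor
    · rintro ⟨i, hmem, hval⟩
      rw [PySem.List.mem_pyRange_one] at hmem
      rw [bne_iff_ne, gP_pyGetD labels i "O" (by omega) (by rw [hlen]; omega),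
        hpt i (by omega) (by omega)] at hval
      obtain ⟨se, hm, h1, h2⟩ := (covC_true spans i).mp ((render_ne_O spans i hsp').mp hval)
      exact ⟨se, hm, by omega⟩
    · rintro ⟨se, hm, hno⟩
      have hb := hsp se hm
      refine ⟨max s se.1, PySem.List.mem_pyRange_one.mpr ⟨by omega, by omega⟩, ?_⟩
      rw [bne_iff_ne, gP_pyGetD labels (max s se.1) "O" (by omega) (by rw [hlen]; omega),
        hpt (max s se.1) (by omega) (by omega)]
      exact (render_ne_O spans (max s se.1) hsp').mpr
        ((covC_true spans (max s se.1)).mpr ⟨se, hm, by omega, by omega⟩)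
  have rhs : (!(spans.all (fun se => decide (e ≤ se.1) || decide (se.2 ≤ s)))) = true ↔
      ∃ se ∈ spans, ¬(e ≤ se.1 ∨ se.2 ≤ s) := by
    simp
  rcases hA : ((PySem.List.pyRange s e 1).any (fun i => PySem.List.pyGetD labels i "O" != "O")) <;>
    rcases hB : (!(spans.all (fun se => decide (e ≤ se.1) || decide (se.2 ≤ s))))
  · rfl
  · exact absurd (key.mpr (rhs.mp hB)) (by simp [hA])
  · exact absurd (rhs.mpr (key.mp hA)) (by simp [hB])
  · rfl

-- Accepting a disjoint span preserves the invariant.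
lemma LoopInv_write (n : Nat) (labels : List String) (spans : List (Int × Int))
    (hInv : LoopInv n labels spans) (s e : Int) (hs : 0 ≤ s) (hse : s < e) (he : e ≤ (n : Int))
    (hdisj : ∀ se ∈ spans, e ≤ se.1 ∨ se.2 ≤ s) :
    LoopInv n ((PySem.List.pyRange (s + 1) e 1).foldl (fun l i => PySem.List.pySetD l i "I-Span")
            (PySem.List.pySetD labels s "B-Span"))
          (spans ++ [(s, e)]) := by
  obtain ⟨hlen, hsp, hpt⟩ := hInv
  have hsetB : PySem.List.pySetD labels s "B-Span" = labels.set s.toNat "B-Span" :=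
    set_pySetD labels s "B-Span" hs (by omega)
  have hlen1 : (labels.set s.toNat "B-Span").length = n := by simp [hlen]
  obtain ⟨flen, fpt⟩ := writeI_fold n (e - (s + 1)).toNat (s + 1) e
    (labels.set s.toNat "B-Span") hlen1 (by omega) he rfl
  refine ⟨by rw [hsetB]; exact flen, ?_, ?_⟩
  · intro se hse'
    rcases List.mem_append.mp hse' with h | h
    · exact hsp se h
    · simp at h; subst h; exact ⟨hs, hse, he⟩
  · intro j hj0 hjn
    rw [hsetB, fpt j hj0 hjn]
    unfold render
    rw [covB_append, covI_append]
    have hBnew : covB [(s, e)] j = decide (s = j) := by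
      simp only [covB, List.any_cons, List.any_nil, Bool.or_false]
      cases hd : decide (s = j) <;> cases hb : (((s, e) : Int × Int).1 == j) <;> simp_all
    have hInew : covI [(s, e)] j = (decide (s < j) && decide (j < e)) := by simp [covI]
    rw [hBnew, hInew]
    by_cases h1 : s + 1 ≤ j ∧ j < e
    · -- interior cell: newly 'I-Span'; no accepted span touches it
      rw [if_pos h1]
      have hnotB : covB spans j = false := by
        rcases hcb : covB spans j
        · rfl
        · obtain ⟨se, hm, hj⟩ := (covB_true spans j).mp hcb
          have := hsp se hm; have := hdisj se hm
          omega
      rw [hnotB]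
      rw [if_neg (by simp; omega), if_pos (by simp; omega)]
    · rw [if_neg h1]
      rw [gP_set labels j s hj0 (by omega) hs (by omega)]
      by_cases h2 : j = s
      · rw [if_pos h2, if_pos (by simp [h2])]
      · rw [if_neg h2, hpt j hj0 hjn]
        unfold render
        have e1 : (covB spans j || decide (s = j)) = covB spans j := by
          rw [decide_eq_false (fun h => h2 h.symm), Bool.or_false]
        have e2 : (covI spans j || (decide (s < j) && decide (j < e))) = covI spans j := by
          have hff : (decide (s < j) && decide (j < e)) = false := by
            by_cases hsj : s < j
            · rw [decide_eq_false (by omega : ¬ j < e), Bool.and_false]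
            · rw [decide_eq_false hsj, Bool.false_and]
          rw [hff, Bool.or_false]
        rw [e1, e2]

def guardOf (specify_role : Option String) (b : String) : Bool :=
  match specify_role with | some sp => b != sp | none => false

lemma guardOf_false (specify_role : Option String) (b : String) (hb : guardOf specify_role b = false) :
    specify_role = none ∨ specify_role = some b := by
  cases specify_role with
  | none => exact Or.inl rfl
  | some sp =>
    right
    unfold guardOf at hb
    simp at hb
    rw [hb]

lemma bfold_some (token_num : Int) (specify_role : Option String)
    (roles : List (Int × Int × String)) :
    ∀ (spans : List (Int × Int)),
    (∀ r ∈ roles, (r.2.1 ≤ token_num ∧ (specify_role = none ∨ specify_role = some r.2.2)) →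
      (0 ≤ r.1 ∧ r.1 < r.2.1)) →
    (roles.foldl (fun (st : Option (List (Int × Int))) (role : Int × Int × String) =>
      match st with
      | none => none
      | some spans =>
        if role.2.1 > token_num then some spans
        else if guardOf specify_role role.2.2 then some spans
        else if decide (0 ≤ role.1 ∧ role.1 < role.2.1) then
          (if spans.all (fun se => decide (role.2.1 ≤ se.1) || decide (se.2 ≤ role.1)) then
            some (spans ++ [(role.1, role.2.1)])
          else some spans)
        else none) (some spans))
    = some (roles.foldl (fun (spans : List (Int × Int)) role =>
        if role.2.1 > token_num then spans
        else if guardOf specify_role role.2.2 then spans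
        else if spans.all (fun se => decide (role.2.1 ≤ se.1) || decide (se.2 ≤ role.1)) then
          spans ++ [(role.1, role.2.1)]
        else spans) spans) := by
  induction roles with
  | nil => intro spans _; rfl
  | cons role roles ih =>
    intro spans hPre
    have hPre' : ∀ r ∈ roles, (r.2.1 ≤ token_num ∧ (specify_role = none ∨ specify_role = some r.2.2)) →
        (0 ≤ r.1 ∧ r.1 < r.2.1) := fun r hr => hPre r (List.mem_cons_of_mem _ hr)
    simp only [List.foldl_cons]
    by_cases h1 : role.2.1 > token_num
    · rw [if_pos h1, if_pos h1]; exact ih spans hPre'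
    · rw [if_neg h1, if_neg h1]
      by_cases h2 : guardOf specify_role role.2.2 = true
      · rw [if_pos h2, if_pos h2]; exact ih spans hPre'
      · rw [if_neg h2, if_neg h2]
        have hq := hPre role List.mem_cons_self
          ⟨by omega, guardOf_false specify_role role.2.2 (Bool.eq_false_iff.mpr h2)⟩
        rw [if_pos (decide_eq_true hq)]
        by_cases h3 : (spans.all (fun se => decide (role.2.1 ≤ se.1) || decide (se.2 ≤ role.1))) = true
        · rw [if_pos h3, if_pos h3]; exact ih _ hPre'
        · rw [if_neg h3, if_neg h3]; exact ih spans hPre'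

lemma main_sim (token_num : Int) (specify_role : Option String)
    (roles : List (Int × Int × String)) :
    ∀ (labels : List String) (count : Int) (spans : List (Int × Int)),
    LoopInv token_num.toNat labels spans →
    (∀ r ∈ roles, (r.2.1 ≤ token_num ∧ (specify_role = none ∨ specify_role = some r.2.2)) →
      (0 ≤ r.1 ∧ r.1 < r.2.1)) →
    LoopInv token_num.toNat
      (roles.foldl (fun st role =>
        let start := role.1
        let stop := role.2.1
        if stop > token_num then st
        else if guardOf specify_role role.2.2 then st
        else if (PySem.List.pyRange start stop 1).any (fun i => PySem.List.pyGetD st.1 i "O" != "O") then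
          (st.1, st.2 + 1)
        else
          let labels := PySem.List.pySetD st.1 start "B-Span"
          let labels := (PySem.List.pyRange (start + 1) stop 1).foldl
            (fun l i => PySem.List.pySetD l i "I-Span") labels
          (labels, st.2)) (labels, count)).1
      (roles.foldl (fun (spans : List (Int × Int)) role =>
        if role.2.1 > token_num then spans
        else if guardOf specify_role role.2.2 then spans
        else if spans.all (fun se => decide (role.2.1 ≤ se.1) || decide (se.2 ≤ role.1)) then
          spans ++ [(role.1, role.2.1)]
        else spans) spans) := by
  induction roles with
  | nil => exact fun labels count spans h _ => h
  | cons role roles ih =>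
    intro labels count spans hInv hnd
    have hnd' : ∀ r ∈ roles, (r.2.1 ≤ token_num ∧ (specify_role = none ∨ specify_role = some r.2.2)) →
        (0 ≤ r.1 ∧ r.1 < r.2.1) := fun r hr => hnd r (List.mem_cons_of_mem _ hr)
    simp only [List.foldl_cons]
    by_cases h1 : role.2.1 > token_num
    · rw [if_pos h1, if_pos h1]; exact ih labels count spans hInv hnd'
    · rw [if_neg h1, if_neg h1]
      by_cases h2 : guardOf specify_role role.2.2 = true
      · rw [if_pos h2, if_pos h2]; exact ih labels count spans hInv hnd'
      · rw [if_neg h2, if_neg h2]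
        have hq := hnd role List.mem_cons_self
          ⟨by omega, guardOf_false specify_role role.2.2 (Bool.eq_false_iff.mpr h2)⟩
        have hs : 0 ≤ role.1 := hq.1
        have hse : role.1 < role.2.1 := hq.2
        have he : role.2.1 ≤ ((token_num.toNat : Int)) := by omega
        rw [scan_eq token_num.toNat labels spans hInv role.1 role.2.1 hs hse he]
        rcases hall : (spans.all (fun se => decide (role.2.1 ≤ se.1) || decide (se.2 ≤ role.1)))
        · rw [if_pos (by rfl), if_neg Bool.false_ne_true]
          exact ih labels (count + 1) spans hInv hnd'
        · rw [if_neg (by simp), if_pos rfl]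
          have hdisj : ∀ se ∈ spans, role.2.1 ≤ se.1 ∨ se.2 ≤ role.1 := by
            intro se hmem
            have := (List.all_eq_true.mp hall) se hmem
            simp at this
            omega
          exact ih _ count _
            (LoopInv_write token_num.toNat labels spans hInv role.1 role.2.1 hs hse he hdisj)
            hnd'

lemma gP_replicate (n : Nat) (j : Int) (hj0 : 0 ≤ j) (hjn : j < (n : Int)) :
    gP (List.replicate n "O") j = "O" := by
  unfold gP
  rw [List.getD_eq_getElem?_getD, List.getElem?_replicate, if_pos (by omega)]
  rfl

lemma assemble (token_num : Int) (labels : List String) (spans : List (Int × Int))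
    (h : LoopInv token_num.toNat labels spans) :
    labels = (PySem.List.pyRange 0 token_num 1).map (fun i =>
      if spans.any (fun se => se.1 == i) then "B-Span"
      else if spans.any (fun se => decide (se.1 < i) && decide (i < se.2)) then "I-Span"
      else "O") := by
  obtain ⟨hlen, hsp, hpt⟩ := h
  have hrl : (PySem.List.pyRange 0 token_num 1).length = token_num.toNat := by
    rw [PySem.List.length_pyRange_one]; omega
  apply List.ext_getElem (by rw [hlen, List.length_map, hrl])
  intro k hk1 hk2
  have hkn : (k : Int) < (token_num.toNat : Int) := by rw [hlen] at hk1; omega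
  have e1 : labels[k] = gP labels (k : Int) := by
    unfold gP
    rw [Int.toNat_natCast, List.getD_eq_getElem?_getD, List.getElem?_eq_getElem hk1]
    rfl
  rw [e1, hpt (k : Int) (by omega) hkn]
  have hk2' : k < (PySem.List.pyRange 0 token_num 1).length := by
    rw [List.length_map] at hk2; exact hk2
  have e2 : (PySem.List.pyRange 0 token_num 1)[k] = ((k : Int)) := by
    simp [PySem.List.getElem_pyRange_one]
  rw [List.getElem_map, e2]
  rfl

-- ===== VERDICT (by name: the statement is the Claim_ definition above) =====
theorem get_role_seqlabels_spec : Claim_equal_get_role_seqlabels := by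
  intro roles token_num specify_role hDom hPre
  unfold Spec_get_role_seqlabels
  unfold get_role_seqlabels get_role_seqlabels_alt
  dsimp only
  have hInv0 : LoopInv token_num.toNat (List.replicate token_num.toNat "O") [] := by
    refine ⟨by simp, by simp, ?_⟩
    intro j hj0 hjn
    rw [gP_replicate _ _ hj0 hjn]
    simp [render, covB, covI]
  show (roles.foldl (fun (st : List String × Int) (role : Int × Int × String) =>
      if role.2.1 > token_num then st
      else if guardOf specify_role role.2.2 then st
      else if (PySem.List.pyRange role.1 role.2.1 1).any (fun i => PySem.List.pyGetD st.1 i "O" != "O") then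
        (st.1, st.2 + 1)
      else
        ((PySem.List.pyRange (role.1 + 1) role.2.1 1).foldl
          (fun l i => PySem.List.pySetD l i "I-Span") (PySem.List.pySetD st.1 role.1 "B-Span"),
         st.2)) (List.replicate token_num.toNat "O", 0)).1
    = (match roles.foldl (fun (st : Option (List (Int × Int))) (role : Int × Int × String) =>
        match st with
        | none => none
        | some spans =>
          if role.2.1 > token_num then some spans
          else if guardOf specify_role role.2.2 then some spans
          else if decide (0 ≤ role.1 ∧ role.1 < role.2.1) then
            (if spans.all (fun se => decide (role.2.1 ≤ se.1) || decide (se.2 ≤ role.1)) then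
              some (spans ++ [(role.1, role.2.1)])
            else some spans)
          else none) (some []) with
      | none => []
      | some spans =>
        (PySem.List.pyRange 0 token_num 1).map (fun i =>
          if spans.any (fun se => se.1 == i) then "B-Span"
          else if spans.any (fun se => decide (se.1 < i) && decide (i < se.2)) then "I-Span"
          else "O"))
  rw [bfold_some token_num specify_role roles [] hPre]
  exact assemble token_num _ _
    (main_sim token_num specify_role roles (List.replicate token_num.toNat "O") 0 [] hInv0 hPre)
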